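-- pv_equiv track=rewrite | github.com/MaximoDiNapoli/2021 | Soporte/Presentacion/main.py | def2
-- ===== SOURCE A (Python) =====
-- def def2(a):
--   spanish3 = []
--   numero = 0
--   for i in range(10):
--     for j in a:
--       if i + 1 == j[0]:
--         numero = numero + 1
--     spanish3.append(numero)
--     numero = 0
--   return spanish3
-- ===== SOURCE B (Python) =====
-- def def2(a):
--   counts = {}
--   for j in a:
--     k = j[0]
--     counts[k] = counts.get(k, 0) + 1
--   return [counts.get(i, 0) for i in range(1, 11)]
-- ===== Notes on version B (the rewrite author's own statement) =====
-- stated objective: simpler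
-- what changed: Replaces ten full rescans of the list (one per bucket 1..10) with a single pass that tallies first fields in a dict, then reads keys 1..10.
import Mathlib
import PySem

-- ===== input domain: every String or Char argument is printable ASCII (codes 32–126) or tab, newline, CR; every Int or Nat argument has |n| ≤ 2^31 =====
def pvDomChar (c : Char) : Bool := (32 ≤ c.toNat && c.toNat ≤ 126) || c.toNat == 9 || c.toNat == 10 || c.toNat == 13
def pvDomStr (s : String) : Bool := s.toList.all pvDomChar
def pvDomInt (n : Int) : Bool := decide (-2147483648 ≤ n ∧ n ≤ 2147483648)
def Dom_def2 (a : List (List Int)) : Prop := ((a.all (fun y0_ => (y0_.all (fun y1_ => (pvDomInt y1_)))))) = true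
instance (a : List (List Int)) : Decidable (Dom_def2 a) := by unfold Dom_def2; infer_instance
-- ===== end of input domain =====

-- B replaces A's ten rescans of the list (one per bucket 1..10) with a single tally pass; return values only.

-- ===== PORT A =====
-- for i in range(10): for j in a: if i+1 == j[0]: numero += 1; append numero; reset.
-- j[0] is ported as pyGetD j 0 0, exact under Pre_def2 (every inner list nonempty).
def def2 (a : List (List Int)) : List Int :=
  (PySem.List.pyRange 0 10 1).foldl
    (fun spanish3 i =>
      spanish3 ++ [a.foldl (fun numero j => if i + 1 = PySem.List.pyGetD j 0 0 then numero + 1 else numero) 0])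
    []

-- ===== PORT B =====
-- counts = {}; for j in a: counts[j[0]] = counts.get(j[0], 0) + 1   (the tally variable, as a helper)
def def2Counts (a : List (List Int)) : PySem.Dict Int Int :=
  a.foldl
    (fun d j => d.insert (PySem.List.pyGetD j 0 0) (d.getD (PySem.List.pyGetD j 0 0) 0 + 1))
    PySem.Dict.empty

-- return [counts.get(i, 0) for i in range(1, 11)]
def def2_alt (a : List (List Int)) : List Int :=
  (PySem.List.pyRange 1 11 1).map (fun i => (def2Counts a).getD i 0)

-- ===== PRECONDITION & SPEC =====
-- Pre_ excludes lists containing an empty inner list, on which both A and B raise IndexError at j[0].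
def Pre_def2 (a : List (List Int)) : Prop := ∀ j ∈ a, j ≠ []
instance (a : List (List Int)) : Decidable (Pre_def2 a) := by unfold Pre_def2; infer_instance
def pvWitness_def2 : List (List Int) := [[1], [2, 5], [1], [11]]
def Spec_def2 (a : List (List Int)) (out : List Int) : Prop := out = def2_alt a
instance (a : List (List Int)) (out : List Int) : Decidable (Spec_def2 a out) := by unfold Spec_def2; infer_instance

-- ===== CLAIM (what is proved, stated in full; the proofs are below) =====
def Claim_equal_def2 : Prop := ∀ (a : List (List Int)), Dom_def2 a → Pre_def2 a → Spec_def2 a (def2 a)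

-- ===== LEMMAS AND PROOFS =====

-- A's result is, for each i in range(10), the count of i+1 among the first fields.
theorem def2_eq_counts (a : List (List Int)) :
    def2 a = (PySem.List.pyRange 0 10 1).map
      (fun i => (((a.map (fun j => PySem.List.pyGetD j 0 0)).count (i + 1) : Nat) : Int)) := by
  unfold def2
  rw [PySem.List.foldl_append_singleton_eq_map, List.nil_append]
  congr 1
  funext i
  rw [show (fun (numero : Int) (j : List Int) =>
        if i + 1 = PySem.List.pyGetD j 0 0 then numero + 1 else numero)
      = (fun (numero : Int) (j : List Int) =>
        if (fun j => decide (i + 1 = PySem.List.pyGetD j 0 0)) j = true then numero + 1 else numero) from by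
        funext n j; simp]
  rw [PySem.List.foldl_count_if]
  have hpt : ∀ x : List Int,
      (decide (i + 1 = PySem.List.pyGetD x 0 0)) = (PySem.List.pyGetD x 0 0 == i + 1) := by
    intro x
    by_cases h : PySem.List.pyGetD x 0 0 = i + 1
    · simp [h]
    · simp [h, Ne.symm h]
  simp [List.count_eq_countP, List.countP_map, Function.comp_def, hpt]

-- B's result is, for each i in range(1, 11), the count of i among the first fields.
theorem def2_alt_eq_counts (a : List (List Int)) :
    def2_alt a = (PySem.List.pyRange 1 11 1).map
      (fun i => (((a.map (fun j => PySem.List.pyGetD j 0 0)).count i : Nat) : Int)) := by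
  unfold def2_alt def2Counts
  congr 1
  funext i
  have h := PySem.Dict.getD_foldl_insert_add_one
      (a.map (fun j => PySem.List.pyGetD j 0 0)) PySem.Dict.empty i
  rw [List.foldl_map] at h
  simpa using h

-- ===== VERDICT (by name: the statement is the Claim_ definition above) =====
theorem def2_spec : Claim_equal_def2 := by
  intro a _ _
  show def2 a = def2_alt a
  rw [def2_eq_counts, def2_alt_eq_counts]
  rw [PySem.List.pyRange_one 0 10, PySem.List.pyRange_one 1 11]
  have h10 : ((10 : Int) - 0).toNat = 10 := by decide
  have h11 : ((11 : Int) - 1).toNat = 10 := by decide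
  rw [h10, h11, List.map_map, List.map_map]
  congr 1
  funext k
  have hk : (0 : Int) + (k : Int) + 1 = 1 + (k : Int) := by omega
  simp only [Function.comp_apply, hk]
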